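-- pv_equiv track=rewrite | github.com/inhyeokjo/baekjoon_algorithm | pgms_72410.py | solution
-- ===== SOURCE A (Python) =====
-- def solution(new_id):
--     able_string = ['-', '_', '.']
--     able_string.extend([chr(i) for i in range(97, 123)])
--     able_string.extend([str(i) for i in range(0, 10)])
--     answer = ''
--
--     new_id = new_id.lower()
--
--     for ch in new_id:
--         if ch in able_string:
--             if not answer or not ch == '.' == answer[-1]:
--                 answer += ch
--
--     if answer and answer[0] == '.':
--         answer = answer[1:]
--     if answer and answer[-1] == '.':
--         answer = answer[:-1]
--
--     if not answer:
--         answer = 'a'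
--     elif len(answer) >= 16:
--         answer = answer[:15]
--         if answer[-1] == '.':
--             answer = answer[:-1]
--
--     if len(answer) <= 2:
--         while len(answer) < 3:
--             answer += answer[-1]
--     return answer
-- ===== SOURCE B (Python) =====
-- def solution(new_id):
--     t = ''.join(c for c in new_id.lower() if c in "abcdefghijklmnopqrstuvwxyz0123456789-_.")
--     s = '.'.join(p for p in t.split('.') if p)
--     if not s:
--         s = 'a'
--     elif len(s) >= 16:
--         s = s[:15].removesuffix('.')
--     return s.ljust(3, s[-1])
-- ===== Notes on version B (the rewrite author's own statement) =====
-- stated objective: idiomatic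
-- what changed: A builds the answer in one character loop with an accumulator, testing membership in a 39-element list and suppressing a dot whenever the accumulator already ends in one, then strips an edge dot at each end; B never deduplicates at all: it filters the lowered string, splits it on the dot character, discards the empty segments and joins them back, which collapses dot runs and removes edge dots in one split/join step, then applies the same truncate/pad tail.
import Mathlib
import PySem

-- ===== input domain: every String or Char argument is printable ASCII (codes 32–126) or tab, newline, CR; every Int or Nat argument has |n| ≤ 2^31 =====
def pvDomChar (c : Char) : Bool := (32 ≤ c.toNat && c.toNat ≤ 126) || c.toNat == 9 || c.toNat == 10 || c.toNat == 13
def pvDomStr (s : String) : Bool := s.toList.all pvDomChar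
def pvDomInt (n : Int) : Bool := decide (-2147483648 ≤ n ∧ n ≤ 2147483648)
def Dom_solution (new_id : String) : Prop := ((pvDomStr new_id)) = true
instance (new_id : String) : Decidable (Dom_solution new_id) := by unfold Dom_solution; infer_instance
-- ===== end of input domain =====

-- B replaces A's single accumulator loop (per-character dot suppression against the answer's
-- last char, plus two edge-dot strips) by a split/join normalisation: split the filtered
-- string on '.', drop the empty segments, join with '.'; same truncate/pad tail.

-- ===== PORT A =====
-- able_string holds only 1-character strings, so it is ported as the corresponding List Char
-- (membership of the 1-char ch is exact). Each statement of A's body is a named helper.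
def pvAble : List Char :=
  (['-', '_', '.'] ++ (PySem.List.pyRange 97 123 1).map (fun i => Char.ofNat i.toNat))
    ++ (PySem.List.pyRange 0 10 1).flatMap (fun i => PySem.Int.toChars i)

-- body of A's loop once `ch in able_string` holds
def pvStepD (answer : List Char) (ch : Char) : List Char :=
  if answer.isEmpty || !(ch == '.' && PySem.List.pyGet? answer (-1) == some '.') then
    answer ++ [ch]
  else answer

def pvStepA (answer : List Char) (ch : Char) : List Char :=
  if pvAble.contains ch = true then pvStepD answer ch else answer

-- `if answer and answer[0] == '.': answer = answer[1:]`
def pvStripHeadA (answer : List Char) : List Char :=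
  if !answer.isEmpty && PySem.List.pyGet? answer 0 == some '.' then
    PySem.List.slice answer (some 1) none else answer

-- `if answer and answer[-1] == '.': answer = answer[:-1]`
def pvStripTailA (answer : List Char) : List Char :=
  if !answer.isEmpty && PySem.List.pyGet? answer (-1) == some '.' then
    PySem.List.slice answer none (some (-1)) else answer

-- `if not answer: … elif len(answer) >= 16: …`
def pvBranchA (answer : List Char) : List Char :=
  if answer.isEmpty then ['a']
  else if 16 ≤ answer.length then
    let answer := PySem.List.slice answer none (some 15)
    if PySem.List.pyGet? answer (-1) == some '.' then
      PySem.List.slice answer none (some (-1)) else answer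
  else answer

-- the `while len(answer) < 3: answer += answer[-1]` loop; answer[-1] on [] would be an
-- IndexError in Python (unreachable at the call site), ported as returning answer.
def pvPadA (answer : List Char) : List Char :=
  if answer.length < 3 then
    match PySem.List.pyGet? answer (-1) with
    | some c => pvPadA (answer ++ [c])
    | none => answer
  else answer
termination_by 3 - answer.length
decreasing_by simp_all; omega

-- `if len(answer) <= 2:` around the while loop
def pvPadGuardA (answer : List Char) : List Char :=
  if answer.length ≤ 2 then pvPadA answer else answer

def solution (new_id : String) : String :=
  String.ofList (pvPadGuardA (pvBranchA (pvStripTailA (pvStripHeadA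
    ((PySem.Chars.lower new_id.toList).foldl pvStepA [])))))

-- ===== PORT B =====
def pvAllowed : List Char := "-_.abcdefghijklmnopqrstuvwxyz0123456789".toList

-- hand port of str.removesuffix('.'): exact (drop at most one trailing dot)
def pvRemoveSuffixDot (s : List Char) : List Char :=
  if PySem.Chars.endswith s ['.'] then s.dropLast else s

-- `if not s: … elif len(s) >= 16: s = s[:15].removesuffix('.')`
def pvBranchB (s : List Char) : List Char :=
  if s.isEmpty then ['a']
  else if 16 ≤ s.length then pvRemoveSuffixDot (PySem.List.slice s none (some 15))
  else s

-- `s.ljust(3, s[-1])`; s[-1] on [] would raise (unreachable: s is never empty here)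
def pvLjustB (s : List Char) : List Char :=
  match PySem.List.pyGet? s (-1) with
  | some c => s ++ List.replicate (3 - s.length) c
  | none => s

-- `'.'.join(p for p in t.split('.') if p)` = split on '.', drop empty parts, join with '.'
def solution_alt (new_id : String) : String :=
  let t := (PySem.Chars.lower new_id.toList).filter (fun c => pvAllowed.contains c)
  let s := PySem.Chars.join ['.']
    ((PySem.Chars.splitOn t ['.']).filter (fun p => !p.isEmpty))
  String.ofList (pvLjustB (pvBranchB s))

-- ===== PRECONDITION & SPEC =====
def Spec_solution (new_id : String) (out : String) : Prop := out = solution_alt new_id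
instance (new_id : String) (out : String) : Decidable (Spec_solution new_id out) := by unfold Spec_solution; infer_instance

-- ===== CLAIM (what is proved, stated in full; the proofs are below) =====
def Claim_equal_solution : Prop := ∀ (new_id : String), Dom_solution new_id → Spec_solution new_id (solution new_id)

-- ===== LEMMAS AND PROOFS =====

theorem pvAble_eq : pvAble = pvAllowed := by decide

-- A-side normal forms used only by the proof: the zip-with-previous dedup …
def pvDedupB (t : List Char) : List Char :=
  (((' ' :: t).zip t).filter (fun pc => !(pc.1 == '.' && pc.2 == '.'))).map Prod.snd

def pvRemovePrefixDot (s : List Char) : List Char :=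
  if PySem.Chars.startswith s ['.'] then s.drop 1 else s

-- … its recursive form (the Bool records whether the previous ORIGINAL char was a dot) …
def pvD (b : Bool) : List Char → List Char
  | [] => []
  | c :: cs => if c = '.' then (if b then pvD true cs else '.' :: pvD true cs)
               else c :: pvD false cs

-- … and the structural form of split-on-dot / join
def pvSplitR : List Char → List (List Char)
  | [] => [[]]
  | c :: cs => if c = '.' then [] :: pvSplitR cs else (pvSplitR cs).modifyHead (c :: ·)

def pvJ (ps : List (List Char)) : List Char :=
  PySem.Chars.join ['.'] (ps.filter (fun p => !p.isEmpty))

def pvK : List (List Char) → List Char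
  | [] => []
  | h :: r => if r.filter (fun p => !p.isEmpty) = [] then h else h ++ '.' :: pvJ r

-- B's zip-with-previous pairs, in the recursive shape the induction uses
theorem pvZip_cons (p c : Char) (cs : List Char) :
    ((p :: (c :: cs)).zip (c :: cs)) = (p, c) :: ((c :: cs).zip cs) := rfl

-- the loop invariant: A's fold with accumulator acc equals acc ++ the zip-dedup of the rest,
-- provided "last of acc is a dot ↔ the previous char p is a dot"
theorem pvFold_eq_zip (t : List Char) : ∀ (acc : List Char) (p : Char),
    (p = '.' ↔ acc.getLast? = some '.') →
    t.foldl pvStepD acc =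
      acc ++ ((((p :: t).zip t).filter (fun pc => !(pc.1 == '.' && pc.2 == '.'))).map Prod.snd) := by
  induction t with
  | nil => intro acc p _; simp
  | cons c cs ih =>
    intro acc p hinv
    rw [List.foldl_cons, pvZip_cons]
    by_cases hkeep : c = '.' ∧ p = '.'
    · -- char dropped on both sides
      obtain ⟨hc, hp⟩ := hkeep
      have hlast : acc.getLast? = some '.' := hinv.mp hp
      have hne : acc ≠ [] := by intro h; simp [h] at hlast
      have hstep : pvStepD acc c = acc := by
        simp [pvStepD, hc, PySem.List.pyGet?_neg_one, hlast, hne]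
      rw [hstep, ih acc c (by simp [hc, hlast])]
      simp [hc, hp]
    · -- char kept on both sides
      have hcond : ¬(c = '.' ∧ acc.getLast? = some '.') := by
        intro ⟨h1, h2⟩; exact hkeep ⟨h1, hinv.mpr h2⟩
      have hstep : pvStepD acc c = acc ++ [c] := by
        rcases acc with _ | ⟨a, as⟩
        · simp [pvStepD]
        · simp only [pvStepD, PySem.List.pyGet?_neg_one]
          have : ¬(c == '.' && (a :: as).getLast? == some '.') = true := by
            simp only [Bool.and_eq_true, beq_iff_eq]; exact fun ⟨h1, h2⟩ => hcond ⟨h1, h2⟩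
          simp [this]
      have hinv' : (c = '.' ↔ (acc ++ [c]).getLast? = some '.') := by
        simp
      rw [hstep, ih (acc ++ [c]) c hinv']
      have hptrue : (!((p, c).1 == '.' && (p, c).2 == '.')) = true := by
        simp only [Bool.not_eq_eq_eq_not, Bool.not_true, Bool.and_eq_false_iff]
        rcases Decidable.em (p = '.') with hp | hp
        · right; simp; exact fun hc => hkeep ⟨hc, hp⟩
        · left; simp [hp]
      rw [List.filter_cons, if_pos hptrue]
      simp

-- A's whole loop over the lowered-and-filtered string = the zip-dedup
theorem pvLoop_eq (l : List Char) :
    l.foldl pvStepA [] =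
      pvDedupB (l.filter (fun c => pvAllowed.contains c)) := by
  have h1 : l.foldl pvStepA [] = (l.filter (fun c => pvAble.contains c)).foldl pvStepD [] := by
    rw [List.foldl_filter]; rfl
  rw [h1, pvAble_eq, pvDedupB,
    pvFold_eq_zip (l.filter (fun c => pvAllowed.contains c)) [] ' ' (by simp)]
  simp

-- A's guarded leading-dot strip = removeprefix('.')
theorem pvStrip_head (s : List Char) : pvStripHeadA s = pvRemovePrefixDot s := by
  rcases s with _ | ⟨c, cs⟩
  · simp [pvStripHeadA, pvRemovePrefixDot, PySem.Chars.startswith]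
  · have h0 : PySem.List.pyGet? (c :: cs) 0 = some c := by
      simp [PySem.List.pyGet?, PySem.List.pyIdx?]
    by_cases hc : c = '.'
    · subst hc
      have hsw : PySem.Chars.startswith ('.' :: cs) ['.'] = true := by
        rw [PySem.Chars.startswith_iff]; exact ⟨cs, rfl⟩
      have hsl : PySem.List.slice ('.' :: cs) (some 1) none = cs := by
        rw [PySem.List.slice_from _ (by norm_num)]; rfl
      simp [pvStripHeadA, pvRemovePrefixDot, hsw, hsl]
    · have hsw : PySem.Chars.startswith (c :: cs) ['.'] = false := by
        rw [Bool.eq_false_iff]; intro h; rw [PySem.Chars.startswith_iff] at h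
        rcases h with ⟨u, hu⟩
        simp only [List.singleton_append, List.cons.injEq] at hu
        exact hc hu.1.symm
      simp [pvStripHeadA, pvRemovePrefixDot, hsw, hc]

theorem pvEndswith_iff_getLast (s : List Char) :
    PySem.Chars.endswith s ['.'] = true ↔ s.getLast? = some '.' := by
  rw [PySem.Chars.endswith_iff]
  constructor
  · rintro ⟨u, rfl⟩; simp
  · intro h
    rcases s.eq_nil_or_concat with rfl | ⟨u, a, rfl⟩
    · simp at h
    · simp at h; exact ⟨u, by simp [h]⟩

-- A's unguarded trailing-dot strip (inside the >= 16 branch) = removesuffix('.')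
theorem pvStrip_last' (s : List Char) :
    (if PySem.List.pyGet? s (-1) == some '.' then
        PySem.List.slice s none (some (-1)) else s) = pvRemoveSuffixDot s := by
  rw [pvRemoveSuffixDot, PySem.List.pyGet?_neg_one, PySem.List.slice_to_neg_one]
  by_cases h : s.getLast? = some '.'
  · simp [h, (pvEndswith_iff_getLast s).mpr h]
  · have : ¬ PySem.Chars.endswith s ['.'] = true := fun hc =>
      h ((pvEndswith_iff_getLast s).mp hc)
    simp [h, this]

-- A's guarded trailing-dot strip = removesuffix('.')
theorem pvStrip_last (s : List Char) : pvStripTailA s = pvRemoveSuffixDot s := by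
  rcases s with _ | ⟨c, cs⟩
  · simp [pvStripTailA, pvRemoveSuffixDot, PySem.Chars.endswith]
  · rw [pvStripTailA, ← pvStrip_last' (c :: cs)]; simp

-- removesuffix('.') commutes with a nonempty-tail cons, and with a non-dot cons
theorem pvRsuf_cons_of_ne_nil (c : Char) (y : List Char) (hy : y ≠ []) :
    pvRemoveSuffixDot (c :: y) = c :: pvRemoveSuffixDot y := by
  have hl : (c :: y).getLast? = y.getLast? := by
    cases y with
    | nil => exact absurd rfl hy
    | cons b v => simp [List.getLast?_cons_cons]
  by_cases h : y.getLast? = some '.'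
  · have h1 := (pvEndswith_iff_getLast y).mpr h
    have h2 := (pvEndswith_iff_getLast (c :: y)).mpr (hl.trans h)
    simp [pvRemoveSuffixDot, h1, h2, List.dropLast_cons_of_ne_nil hy]
  · have h1 : ¬ PySem.Chars.endswith y ['.'] = true := fun hc =>
      h ((pvEndswith_iff_getLast y).mp hc)
    have h2 : ¬ PySem.Chars.endswith (c :: y) ['.'] = true := fun hc =>
      h (hl.symm.trans ((pvEndswith_iff_getLast (c :: y)).mp hc))
    simp [pvRemoveSuffixDot, h1, h2]

theorem pvRsuf_cons_of_ne_dot (c : Char) (hc : c ≠ '.') (y : List Char) :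
    pvRemoveSuffixDot (c :: y) = c :: pvRemoveSuffixDot y := by
  rcases y with _ | ⟨b, v⟩
  · have h : PySem.Chars.endswith [c] ['.'] = false := by
      rw [Bool.eq_false_iff]
      intro hend
      exact hc (by simpa using (pvEndswith_iff_getLast [c]).mp hend)
    simp [pvRemoveSuffixDot, h]
  · exact pvRsuf_cons_of_ne_nil c _ (by simp)

-- the zip dedup is pvD with previous char "not a dot"
theorem pvDedup_aux (t : List Char) : ∀ p : Char,
    ((((p :: t).zip t).filter (fun pc => !(pc.1 == '.' && pc.2 == '.'))).map Prod.snd)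
      = pvD (p == '.') t := by
  induction t with
  | nil => intro p; simp [pvD]
  | cons c cs ih =>
    intro p
    rw [pvZip_cons, List.filter_cons]
    by_cases hp : p = '.'
    · by_cases hc : c = '.'
      · subst hp; subst hc
        rw [if_neg (by simp), ih '.']
        simp [pvD]
      · subst hp
        rw [if_pos (by simp [hc]), List.map_cons, ih c]
        have hcb : (c == '.') = false := by simp [hc]
        rw [hcb]
        simp [pvD, hc]
    · rw [if_pos (by simp [hp]), List.map_cons, ih c]
      by_cases hc : c = '.'
      · subst hc; simp [pvD, hp]
      · have hcb : (c == '.') = false := by simp [hc]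
        rw [hcb]
        simp [pvD, hc]

theorem pvDedupB_eq_pvD (t : List Char) : pvDedupB t = pvD false t := by
  have := pvDedup_aux t ' '
  simpa [pvDedupB] using this

-- stripping the one possible leading dot flips pvD's flag to true
theorem pvRpre_pvD (t : List Char) : pvRemovePrefixDot (pvD false t) = pvD true t := by
  rcases t with _ | ⟨c, cs⟩
  · simp [pvD, pvRemovePrefixDot, PySem.Chars.startswith]
  · by_cases hc : c = '.'
    · have hsw : PySem.Chars.startswith ('.' :: pvD true cs) ['.'] = true := by
        rw [PySem.Chars.startswith_iff]; exact ⟨pvD true cs, rfl⟩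
      simp [pvD, hc, pvRemovePrefixDot, hsw]
    · have hsw : PySem.Chars.startswith (c :: pvD false cs) ['.'] = false := by
        rw [Bool.eq_false_iff]; intro h; rw [PySem.Chars.startswith_iff] at h
        rcases h with ⟨u, hu⟩
        simp only [List.singleton_append, List.cons.injEq] at hu
        exact hc hu.1.symm
      simp [pvD, hc, pvRemovePrefixDot, hsw]

theorem pvSplitR_ne_nil (t : List Char) : pvSplitR t ≠ [] := by
  induction t with
  | nil => simp [pvSplitR]
  | cons c cs ih =>
    rw [pvSplitR]
    split_ifs
    · simp
    · rcases h : pvSplitR cs with _ | ⟨x, xs⟩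
      · exact absurd h ih
      · simp [List.modifyHead]

-- PySem's fueled splitOn on the single-char separator '.' is the structural pvSplitR
theorem pvGo_eq : ∀ (fuel : Nat) (l cur : List Char) (acc : List (List Char)),
    l.length < fuel →
    PySem.Chars.splitOn.go ['.'] fuel l cur acc
      = acc.reverse ++ (pvSplitR l).modifyHead (cur.reverse ++ ·) := by
  intro fuel
  induction fuel with
  | zero => intro l cur acc h; omega
  | succ n ih =>
    intro l cur acc h
    rcases l with _ | ⟨c, rest⟩
    · rw [PySem.Chars.splitOn.go]
      simp [pvSplitR, List.modifyHead]
      omega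
    · rw [PySem.Chars.splitOn.go]
      by_cases hc : c = '.'
      · have hpre : List.isPrefixOf ['.'] (c :: rest) = true := by
          simp [List.isPrefixOf, hc]
        rw [if_pos hpre]
        have hlen : rest.length < n := by simpa using h
        rcases hsp : pvSplitR rest with _ | ⟨x, xs⟩
        · exact absurd hsp (pvSplitR_ne_nil rest)
        · have hdrop : List.drop (['.'] : List Char).length (c :: rest) = rest := rfl
          rw [hdrop, ih _ _ _ hlen]
          simp [pvSplitR, hc, hsp, List.modifyHead]
      · have hpre : ¬ List.isPrefixOf ['.'] (c :: rest) = true := by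
          simp [List.isPrefixOf]; exact fun h' => hc h'.symm
        rw [if_neg hpre]
        have hlen : rest.length < n := by simpa using h
        rw [ih _ _ _ hlen]
        rcases hsp : pvSplitR rest with _ | ⟨x, xs⟩
        · exact absurd hsp (pvSplitR_ne_nil rest)
        · simp [pvSplitR, hc, hsp, List.modifyHead]

theorem pvSplitOn_eq (t : List Char) : PySem.Chars.splitOn t ['.'] = pvSplitR t := by
  rw [PySem.Chars.splitOn, pvGo_eq (t.length + 1) t [] [] (by omega)]
  rcases hsp : pvSplitR t with _ | ⟨x, xs⟩
  · exact absurd hsp (pvSplitR_ne_nil t)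
  · simp [List.modifyHead]

-- join/filter facts in the shapes the main induction uses
theorem pvJ_nil : pvJ [] = [] := by simp [pvJ, PySem.Chars.join, List.intercalate]

theorem pvJ_nil_cons (ps : List (List Char)) : pvJ ([] :: ps) = pvJ ps := by
  simp [pvJ]

theorem pvJ_cons_cons (c : Char) (h : List Char) (ps : List (List Char)) :
    pvJ ((c :: h) :: ps) =
      if ps.filter (fun p => !p.isEmpty) = [] then c :: h else (c :: h) ++ '.' :: pvJ ps := by
  rw [pvJ, List.filter_cons, if_pos (by simp)]
  rcases hf : ps.filter (fun p => !p.isEmpty) with _ | ⟨x, xs⟩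
  · simp [hf, PySem.Chars.join, List.intercalate]
  · simp [hf, pvJ, PySem.Chars.join, List.intercalate]

theorem pvK_eq_pvJ (c : Char) (h : List Char) (ps : List (List Char)) :
    pvK ((c :: h) :: ps) = pvJ ((c :: h) :: ps) := by
  rw [pvK, pvJ_cons_cons]

-- the main induction: collapsed-with-leading-dots-dropped + removesuffix = join of the
-- nonempty split parts (plus the variant with the leading dot kept, and emptiness)
theorem pvMid (cs : List Char) :
    (pvRemoveSuffixDot (pvD true cs) = pvJ (pvSplitR cs))
    ∧ (pvRemoveSuffixDot (pvD false cs) = pvK (pvSplitR cs))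
    ∧ (pvD true cs = [] ↔ (pvSplitR cs).filter (fun p => !p.isEmpty) = []) := by
  induction cs with
  | nil =>
    refine ⟨?_, ?_, ?_⟩ <;>
      simp [pvD, pvSplitR, pvJ_nil_cons, pvJ_nil, pvK, pvRemoveSuffixDot, PySem.Chars.endswith]
  | cons c cs ih =>
    obtain ⟨ih1, ih2, ih3⟩ := ih
    by_cases hc : c = '.'
    · subst hc
      have hsp : pvSplitR ('.' :: cs) = [] :: pvSplitR cs := by simp [pvSplitR]
      have hD : pvD true ('.' :: cs) = pvD true cs := by simp [pvD]
      have hDf : pvD false ('.' :: cs) = '.' :: pvD true cs := by simp [pvD]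
      refine ⟨?_, ?_, ?_⟩
      · rw [hD, hsp, pvJ_nil_cons]; exact ih1
      · rw [hDf, hsp]
        rcases hsp2 : pvSplitR cs with _ | ⟨x, xs⟩
        · exact absurd hsp2 (pvSplitR_ne_nil cs)
        · rw [pvK]
          by_cases hemp : pvD true cs = []
          · have hf : ((x :: xs).filter (fun p => !p.isEmpty)) = [] := by
              rw [← hsp2]; exact ih3.mp hemp
            rw [if_pos hf, hemp]
            rfl
          · have hf : ¬ ((x :: xs).filter (fun p => !p.isEmpty)) = [] := by
              rw [← hsp2]; exact fun h => hemp (ih3.mpr h)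
            rw [if_neg hf, pvRsuf_cons_of_ne_nil '.' _ hemp, ih1, hsp2]
            rfl
      · rw [hD, hsp]; simpa using ih3
    · have hsp : pvSplitR (c :: cs) = (pvSplitR cs).modifyHead (c :: ·) := by
        simp [pvSplitR, hc]
      rcases hsp2 : pvSplitR cs with _ | ⟨x, xs⟩
      · exact absurd hsp2 (pvSplitR_ne_nil cs)
      have hsp' : pvSplitR (c :: cs) = (c :: x) :: xs := by
        rw [hsp, hsp2]; rfl
      have hD : pvD true (c :: cs) = c :: pvD false cs := by simp [pvD, hc]
      have hDf : pvD false (c :: cs) = c :: pvD false cs := by simp [pvD, hc]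
      have key : pvRemoveSuffixDot (c :: pvD false cs) = pvJ ((c :: x) :: xs) := by
        rw [pvRsuf_cons_of_ne_dot c hc, ih2, hsp2, pvJ_cons_cons, pvK]
        split_ifs <;> rfl
      refine ⟨?_, ?_, ?_⟩
      · rw [hD, hsp', key]
      · rw [hDf, hsp', pvK_eq_pvJ, key]
      · constructor
        · intro h; rw [hD] at h; exact absurd h (by simp)
        · intro h
          rw [hsp', List.filter_cons, if_pos (by simp)] at h
          exact absurd h (by simp)

-- the whole middle section of both programs agrees
theorem pvMiddle_eq (t : List Char) :
    pvRemoveSuffixDot (pvRemovePrefixDot (pvDedupB t))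
      = PySem.Chars.join ['.'] ((PySem.Chars.splitOn t ['.']).filter (fun p => !p.isEmpty)) := by
  rw [pvDedupB_eq_pvD, pvRpre_pvD, pvSplitOn_eq]
  exact (pvMid t).1

-- the empty / length-16 branch agrees
theorem pvBranch_eq (s : List Char) : pvBranchA s = pvBranchB s := by
  rw [pvBranchA, pvBranchB]
  rcases Decidable.em (s.isEmpty = true) with h | h
  · simp [h]
  · simp only [h, Bool.false_eq_true, if_false]
    rcases Decidable.em (16 ≤ s.length) with h16 | h16
    · simp only [h16, if_true]
      exact pvStrip_last' (PySem.List.slice s none (some 15))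
    · simp [h16]

-- pvBranchB never returns the empty list
theorem pvBranchB_ne (s : List Char) : pvBranchB s ≠ [] := by
  rw [pvBranchB]
  split_ifs with h1 h2
  · simp
  · rw [PySem.List.slice_to _ (by norm_num), pvRemoveSuffixDot]
    have hlen : (s.take (15 : Int).toNat).length = 15 := by
      simp; omega
    split_ifs with h3
    · intro hc
      have := congrArg List.length hc
      simp at this
      omega
    · intro hc; rw [hc] at hlen; simp at hlen
  · simpa using h1

-- A's guarded padding loop = B's ljust(3, s[-1]), for nonempty s
theorem pvPad_eq (s : List Char) (hs : s ≠ []) : pvPadGuardA s = pvLjustB s := by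
  rw [pvPadGuardA, pvLjustB]
  obtain ⟨u, a, rfl⟩ := s.eq_nil_or_concat.resolve_left hs
  rw [PySem.List.pyGet?_neg_one]
  rcases u with _ | ⟨b, v⟩
  · -- length 1
    show (if _ then pvPadA [a] else _) = _
    rw [pvPadA]; simp [PySem.List.pyGet?_neg_one]
    rw [pvPadA]; simp [PySem.List.pyGet?_neg_one]
    rw [pvPadA]; simp
  · rcases v with _ | ⟨d, w⟩
    · -- length 2
      show (if _ then pvPadA [b, a] else _) = _
      rw [pvPadA]; simp [PySem.List.pyGet?_neg_one]
      rw [pvPadA]; simp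
    · -- length ≥ 3
      have hlen : ¬((b :: d :: w) ++ [a]).length ≤ 2 := by simp
      have hrep : 3 - ((b :: d :: w) ++ [a]).length = 0 := by simp
      simp
      cases (d :: (w ++ [a])).getLast? <;> rfl

theorem solution_eq_alt (new_id : String) : solution new_id = solution_alt new_id := by
  unfold solution solution_alt
  rw [pvLoop_eq, pvStrip_head, pvStrip_last, pvMiddle_eq, pvBranch_eq]
  exact congrArg _ (pvPad_eq _ (pvBranchB_ne _))

-- ===== VERDICT (by name: the statement is the Claim_ definition above) =====
theorem solution_spec : Claim_equal_solution := by
  intro new_id _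
  unfold Spec_solution
  exact solution_eq_alt new_id
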